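-- pv_equiv track=rewrite | github.com/cathieseni/csv-surgeon | csv_surgeon/commands/rename_cols_cmd.py | _rename_header
-- ===== SOURCE A (Python) =====
-- from typing import Dict, List
--
-- def _rename_header(fieldnames: List[str], mapping: Dict[int, str]) -> List[str]:
--     """Return a new header list with positions renamed according to *mapping*."""
--     header = list(fieldnames)
--     for idx, new_name in mapping.items():
--         if idx < 0:
--             idx = len(header) + idx
--         if idx < 0 or idx >= len(header):
--             raise IndexError(
--                 f"Column index {idx} is out of range for a CSV with "
--                 f"{len(header)} columns."
--             )
--         header[idx] = new_name
--     return header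
-- ===== SOURCE B (Python) =====
-- def _rename_header(fieldnames, mapping):
--     """Return a new header list with positions renamed according to *mapping*."""
--     n = len(fieldnames)
--     last = {}
--     for idx, new_name in mapping.items():
--         pos = n + idx if idx < 0 else idx
--         if pos < 0 or pos >= n:
--             raise IndexError(
--                 f"Column index {pos} is out of range for a CSV with "
--                 f"{n} columns."
--             )
--         last[pos] = new_name
--     # sort the (position, name) replacements, then merge them with the header
--     # positions in one linear scan: no random-access writes at all.
--     pairs = sorted(last.items(), key=lambda kv: kv[0])
--     out = []
--     k = 0
--     for i, orig in enumerate(fieldnames):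
--         if k < len(pairs) and pairs[k][0] == i:
--             out.append(pairs[k][1])
--             k += 1
--         else:
--             out.append(orig)
--     return out
-- ===== Notes on version B (the rewrite author's own statement) =====
-- stated objective: alternative
-- what changed: A performs random-access in-place writes into a copied header, one per mapping entry; B instead sorts the normalized (position, name) replacements by position and produces the header by a single linear two-pointer merge of the sorted replacement stream with the header positions, with no indexed writes.
import Mathlib
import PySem

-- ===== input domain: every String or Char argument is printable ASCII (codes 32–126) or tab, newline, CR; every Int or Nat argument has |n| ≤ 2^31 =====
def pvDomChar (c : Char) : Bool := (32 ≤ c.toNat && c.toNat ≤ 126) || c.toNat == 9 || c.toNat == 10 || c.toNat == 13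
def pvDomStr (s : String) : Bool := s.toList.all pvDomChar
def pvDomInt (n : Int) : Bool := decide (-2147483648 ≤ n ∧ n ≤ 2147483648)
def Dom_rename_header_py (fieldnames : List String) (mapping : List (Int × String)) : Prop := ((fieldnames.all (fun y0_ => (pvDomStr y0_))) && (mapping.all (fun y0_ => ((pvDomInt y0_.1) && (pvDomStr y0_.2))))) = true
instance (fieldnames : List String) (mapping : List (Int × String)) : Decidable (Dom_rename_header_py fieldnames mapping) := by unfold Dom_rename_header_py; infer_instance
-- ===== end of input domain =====

-- B replaces A's random-access in-place writes by: normalize/validate the mapping into a last-wins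
-- {position: name} table, sort its items by position, and produce the header by one linear
-- two-pointer merge of the sorted replacement stream with the header positions.

-- ===== PORT A =====
-- literal port of A's loop: copy the header, then write each mapped name in place
-- (where Python raises IndexError the step leaves the header unchanged; Pre_ excludes those inputs)
def rename_header_py (fieldnames : List String) (mapping : List (Int × String)) : List String :=
  mapping.foldl
    (fun header p =>
      let idx : Int := if p.1 < 0 then (header.length : Int) + p.1 else p.1
      if 0 ≤ idx ∧ idx < (header.length : Int) then header.set idx.toNat p.2 else header)
    fieldnames

-- ===== PORT B =====
-- literal port of Source B's merge loop: the pointer k into `pairs` advances exactly on a match,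
-- i.e. the sorted replacement stream is consumed from the front while positions are emitted in order
def renameMerge : List (Int × String) → List (Int × String) → List String
  | [], _ => []
  | (_, orig) :: fs, [] => orig :: renameMerge fs []
  | (i, orig) :: fs, (j, name) :: rest =>
    if j = i then name :: renameMerge fs rest
    else orig :: renameMerge fs ((j, name) :: rest)

def rename_header_py_alt (fieldnames : List String) (mapping : List (Int × String)) : List String :=
  let n : Int := fieldnames.length
  let last : PySem.Dict Int String :=
    mapping.foldl
      (fun d p =>
        let pos : Int := if p.1 < 0 then n + p.1 else p.1
        if 0 ≤ pos ∧ pos < n then d.insert pos p.2 else d)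
      PySem.Dict.empty
  let pairs := PySem.List.sorted last.items (fun kv => kv.1) false
  renameMerge (PySem.List.enumerate fieldnames) pairs

-- ===== PRECONDITION & SPEC =====
-- Pre_ excludes exactly the inputs on which A raises IndexError: a mapping key whose
-- Python-normalized position falls outside the header.
def Pre_rename_header_py (fieldnames : List String) (mapping : List (Int × String)) : Prop :=
  ∀ p ∈ mapping,
    0 ≤ (if p.1 < 0 then (fieldnames.length : Int) + p.1 else p.1) ∧
    (if p.1 < 0 then (fieldnames.length : Int) + p.1 else p.1) < (fieldnames.length : Int)
instance (fieldnames : List String) (mapping : List (Int × String)) : Decidable (Pre_rename_header_py fieldnames mapping) := by unfold Pre_rename_header_py; infer_instance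

def pvWitness_rename_header_py : List String × (List (Int × String)) :=
  (["a", "b", "c"], [(0, "id"), (-1, "z")])

def Spec_rename_header_py (fieldnames : List String) (mapping : List (Int × String)) (out : List String) : Prop := out = rename_header_py_alt fieldnames mapping
instance (fieldnames : List String) (mapping : List (Int × String)) (out : List String) : Decidable (Spec_rename_header_py fieldnames mapping out) := by unfold Spec_rename_header_py; infer_instance

-- ===== CLAIM (what is proved, stated in full; the proofs are below) =====
def Claim_equal_rename_header_py : Prop := ∀ (fieldnames : List String) (mapping : List (Int × String)), Dom_rename_header_py fieldnames mapping → Pre_rename_header_py fieldnames mapping → Spec_rename_header_py fieldnames mapping (rename_header_py fieldnames mapping)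

-- ===== LEMMAS AND PROOFS =====

-- the last-wins dict both sides build (B builds it literally; A's writes are characterized by it)
def renameDict (n : Int) (mapping : List (Int × String)) (d : PySem.Dict Int String) : PySem.Dict Int String :=
  mapping.foldl
    (fun d p =>
      let pos : Int := if p.1 < 0 then n + p.1 else p.1
      if 0 ≤ pos ∧ pos < n then d.insert pos p.2 else d)
    d

-- invariant step: writing position idx in the header = inserting idx into the lookup table
lemma set_eq_map_insert (fieldnames header : List String) (d : PySem.Dict Int String)
    (idx : Int) (v : String)
    (hh : header = (PySem.List.enumerate fieldnames).map (fun q => d.getD q.1 q.2))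
    (h0 : 0 ≤ idx) :
    header.set idx.toNat v
      = (PySem.List.enumerate fieldnames).map (fun q => (d.insert idx v).getD q.1 q.2) := by
  have hlen : header.length = fieldnames.length := by
    simp [hh, PySem.List.length_enumerate]
  apply List.ext_getElem
  · simp [hlen, PySem.List.length_enumerate]
  · intro k hk1 hk2
    have hkn : k < fieldnames.length := by
      simpa [PySem.List.length_enumerate] using hk2
    have hkh : k < header.length := by omega
    have hhk : header[k] = d.getD ((k : Int)) fieldnames[k] := by
      simp [hh, PySem.List.getElem_enumerate]
    rw [List.getElem_set]
    rw [List.getElem_map, PySem.List.getElem_enumerate]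
    rw [PySem.Dict.getD_insert]
    by_cases he : idx.toNat = k
    · have h2 : ((k : Int)) = idx := by omega
      simp [he, h2]
    · have h2 : ¬ ((k : Int)) = idx := by omega
      simp [he, h2, hhk]

-- loop invariant: A's fold over the remaining mapping, started from a header that is the
-- lookup-rendering of dict d, equals the rendering of the dict fold from d
lemma fold_invariant (fieldnames : List String) :
    ∀ (mapping : List (Int × String)) (d : PySem.Dict Int String) (header : List String),
    header = (PySem.List.enumerate fieldnames).map (fun q => d.getD q.1 q.2) →
    mapping.foldl
      (fun header p =>
        let idx : Int := if p.1 < 0 then (header.length : Int) + p.1 else p.1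
        if 0 ≤ idx ∧ idx < (header.length : Int) then header.set idx.toNat p.2 else header)
      header
    = (PySem.List.enumerate fieldnames).map (fun q =>
        (renameDict (fieldnames.length : Int) mapping d).getD q.1 q.2) := by
  intro mapping
  induction mapping with
  | nil => intro d header hh; simpa [renameDict] using hh
  | cons p rest ih =>
    intro d header hh
    have hlen : header.length = fieldnames.length := by
      simp [hh, PySem.List.length_enumerate]
    simp only [renameDict, List.foldl_cons, hlen]
    by_cases hin : 0 ≤ (if p.1 < 0 then (fieldnames.length : Int) + p.1 else p.1) ∧
        (if p.1 < 0 then (fieldnames.length : Int) + p.1 else p.1) < (fieldnames.length : Int)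
    · rw [if_pos hin, if_pos hin]
      exact ih _ _ (set_eq_map_insert fieldnames header d _ p.2 hh hin.1)
    · rw [if_neg hin, if_neg hin]
      exact ih _ _ hh

-- the dict fold keeps keys Nodup and keys within [0, n)
lemma renameDict_keys_nodup (n : Int) :
    ∀ (mapping : List (Int × String)) (d : PySem.Dict Int String),
    d.keys.Nodup → (renameDict n mapping d).keys.Nodup := by
  intro mapping
  induction mapping with
  | nil => intro d h; simpa [renameDict] using h
  | cons p rest ih =>
    intro d h
    simp only [renameDict, List.foldl_cons]
    by_cases hc : 0 ≤ (if p.1 < 0 then n + p.1 else p.1) ∧ (if p.1 < 0 then n + p.1 else p.1) < n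
    · rw [if_pos hc]; exact ih _ (PySem.Dict.nodup_keys_insert _ _ _ h)
    · rw [if_neg hc]; exact ih _ h

lemma renameDict_keys_bound (n : Int) :
    ∀ (mapping : List (Int × String)) (d : PySem.Dict Int String),
    (∀ k ∈ d.keys, 0 ≤ k ∧ k < n) →
    ∀ k ∈ (renameDict n mapping d).keys, 0 ≤ k ∧ k < n := by
  intro mapping
  induction mapping with
  | nil => intro d h; simpa [renameDict] using h
  | cons p rest ih =>
    intro d h
    simp only [renameDict, List.foldl_cons]
    by_cases hc : 0 ≤ (if p.1 < 0 then n + p.1 else p.1) ∧ (if p.1 < 0 then n + p.1 else p.1) < n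
    · rw [if_pos hc]
      refine ih _ ?_
      intro k hk
      rcases (PySem.Dict.mem_keys_insert _ _ _ _).mp hk with h1 | h1
      · exact h1 ▸ hc
      · exact h _ h1
    · rw [if_neg hc]; exact ih _ h

-- lookup of the dict via find? in any Nodup-keyed permutation of its items
def lookVal (ps : List (Int × String)) (i : Int) (orig : String) : String :=
  match ps.find? (fun p => p.1 == i) with
  | some p => p.2
  | none => orig

lemma find?_of_mem_nodup_keys :
    ∀ (ps : List (Int × String)) (i : Int) (v : String),
    (ps.map (·.1)).Nodup → (i, v) ∈ ps → ps.find? (fun p => p.1 == i) = some (i, v) := by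
  intro ps
  induction ps with
  | nil => intro i v _ h; simp at h
  | cons q rest ih =>
    intro i v hnd hm
    rw [List.map_cons] at hnd
    have hnd' := List.nodup_cons.mp hnd
    rcases List.mem_cons.mp hm with h | h
    · subst h; simp
    · have hq : ¬ ((fun (p : Int × String) => p.1 == i) q) = true := by
        simp only [beq_iff_eq]
        intro he
        exact hnd'.1 (List.mem_map.mpr ⟨(i, v), h, he.symm⟩)
      rw [List.find?_cons_of_neg (p := fun (p : Int × String) => p.1 == i) (a := q) (l := rest) hq]
      exact ih i v hnd'.2 h

lemma lookVal_eq_getD (d : PySem.Dict Int String) (ps : List (Int × String))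
    (hperm : ps.Perm d.items) (hnd : d.keys.Nodup) (i : Int) (orig : String) :
    lookVal ps i orig = d.getD i orig := by
  have hndp : (ps.map (·.1)).Nodup := by
    have hp : (ps.map (·.1)).Perm (d.items.map (·.1)) := hperm.map _
    exact hp.nodup_iff.mpr (by simpa [PySem.Dict.keys] using hnd)
  by_cases h : ∃ v, (i, v) ∈ ps
  · obtain ⟨v, hv⟩ := h
    have hfin : ps.find? (fun p => p.1 == i) = some (i, v) :=
      find?_of_mem_nodup_keys ps i v hndp hv
    have hitems : (i, v) ∈ d.items := hperm.mem_iff.mp hv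
    rw [lookVal, hfin, PySem.Dict.getD_of_mem_items d hitems hnd orig]
  · have hfin : ps.find? (fun p => p.1 == i) = none := by
      apply List.find?_eq_none.mpr
      intro p hp hmatch
      have hp1 : p.1 = i := by simpa using hmatch
      exact h ⟨p.2, by rw [← hp1]; simpa using hp⟩
    have hnk : i ∉ d.keys := by
      intro hk
      obtain ⟨w, hw⟩ : ∃ x, (i, x) ∈ d.items := by simpa [PySem.Dict.keys] using hk
      exact h ⟨w, hperm.mem_iff.mpr hw⟩
    rw [lookVal, hfin,
      PySem.Dict.getD_of_get?_eq_none d orig ((PySem.Dict.get?_eq_none_iff_not_mem_keys d i).mpr hnk)]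

-- B's merge over a strictly-increasing replacement stream = pointwise lookVal
lemma merge_eq_map_lookVal :
    ∀ (fs : List String) (s : Int) (ps : List (Int × String)),
    ps.Pairwise (fun a b => a.1 < b.1) → (∀ p ∈ ps, s ≤ p.1) →
    renameMerge (PySem.List.enumerate fs s) ps
      = (PySem.List.enumerate fs s).map (fun q => lookVal ps q.1 q.2) := by
  intro fs
  induction fs with
  | nil => intro s ps _ _; simp [PySem.List.enumerate_nil, renameMerge]
  | cons f rest ih =>
    intro s ps hpw hge
    rw [PySem.List.enumerate_cons]
    match ps with
    | [] =>
      simp only [renameMerge, List.map_cons, lookVal, List.find?_nil]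
      exact congrArg _ (ih (s + 1) [] (by simp) (by simp))
    | (j, name) :: ps' =>
      by_cases hj : j = s
      · subst hj
        have hunf : renameMerge ((j, f) :: PySem.List.enumerate rest (j + 1)) ((j, name) :: ps')
            = name :: renameMerge (PySem.List.enumerate rest (j + 1)) ps' := by
          simp [renameMerge]
        rw [hunf, List.map_cons]
        have hhead : lookVal ((j, name) :: ps') j f = name := by
          simp [lookVal]
        rw [hhead]
        have hge' : ∀ p ∈ ps', j + 1 ≤ p.1 := by
          intro p hp
          have := (List.pairwise_cons.mp hpw).1 p hp
          omega
        rw [ih (j + 1) ps' (List.pairwise_cons.mp hpw).2 hge']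
        refine congrArg _ (List.map_congr_left ?_).symm
        intro q hq
        have hq1 : j + 1 ≤ q.1 := by
          rcases (PySem.List.mem_enumerate_iff _ _ _).mp hq with ⟨k, hk, rfl⟩
          simp
        have hstep : List.find? (fun (p : Int × String) => p.1 == q.1) ((j, name) :: ps')
            = List.find? (fun (p : Int × String) => p.1 == q.1) ps' :=
          List.find?_cons_of_neg (by simp only [beq_iff_eq]; intro he; omega)
        simp [lookVal, hstep]
      · have hjs : s + 1 ≤ j := by
          have := hge (j, name) (by simp)
          simp at this; omega
        have hunf : renameMerge ((s, f) :: PySem.List.enumerate rest (s + 1)) ((j, name) :: ps')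
            = f :: renameMerge (PySem.List.enumerate rest (s + 1)) ((j, name) :: ps') := by
          simp [renameMerge, hj]
        rw [hunf, List.map_cons]
        have hhead : lookVal ((j, name) :: ps') s f = f := by
          have hnone : ((j, name) :: ps').find? (fun p => p.1 == s) = none := by
            apply List.find?_eq_none.mpr
            intro p hp hmatch
            have hp1 : p.1 = s := by simpa using hmatch
            rcases List.mem_cons.mp hp with h | h
            · rw [h] at hp1; simp at hp1; omega
            · have := (List.pairwise_cons.mp hpw).1 p h
              omega
          simp [lookVal, hnone]
        rw [hhead]
        have hge' : ∀ p ∈ (j, name) :: ps', s + 1 ≤ p.1 := by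
          intro p hp
          rcases List.mem_cons.mp hp with h | h
          · rw [h]; exact hjs
          · have := (List.pairwise_cons.mp hpw).1 p h
            omega
        exact congrArg _ (ih (s + 1) _ hpw hge')

-- ===== VERDICT (by name: the statement is the Claim_ definition above) =====
theorem rename_header_py_spec : Claim_equal_rename_header_py := by
  intro fieldnames mapping _ _
  unfold Spec_rename_header_py
  have hn : (0 : Int) ≤ (fieldnames.length : Int) := by positivity
  set n : Int := (fieldnames.length : Int) with hndef
  set D := renameDict n mapping PySem.Dict.empty with hD
  set ps := PySem.List.sorted D.items (fun kv => kv.1) false with hps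
  have hBdef : rename_header_py_alt fieldnames mapping
      = renameMerge (PySem.List.enumerate fieldnames) ps := rfl
  have hAdef : rename_header_py fieldnames mapping
      = (PySem.List.enumerate fieldnames).map (fun q => D.getD q.1 q.2) := by
    rw [hD, hndef]
    exact fold_invariant fieldnames mapping PySem.Dict.empty fieldnames (by simp)
  rw [hAdef, hBdef]
  have hnd : D.keys.Nodup := renameDict_keys_nodup n mapping PySem.Dict.empty (by simp)
  have hbound : ∀ k ∈ D.keys, 0 ≤ k ∧ k < n :=
    renameDict_keys_bound n mapping PySem.Dict.empty (by simp)
  have hperm : ps.Perm D.items := PySem.List.sorted_perm _ _ _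
  have hndp : (ps.map (·.1)).Nodup :=
    (hperm.map _).nodup_iff.mpr (by simpa [PySem.Dict.keys] using hnd)
  have hle : ps.Pairwise (fun a b => a.1 ≤ b.1) := PySem.List.sorted_pairwise _ _
  have hpw : ps.Pairwise (fun a b => a.1 < b.1) := by
    have hne : ps.Pairwise (fun a b => a.1 ≠ b.1) := List.pairwise_map.mp hndp
    exact (hle.and hne).imp (fun h => lt_of_le_of_ne h.1 h.2)
  have hge : ∀ p ∈ ps, (0 : Int) ≤ p.1 := by
    intro p hp
    have hmem : p ∈ D.items := hperm.mem_iff.mp hp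
    exact (hbound p.1 (PySem.Dict.mem_keys_of_mem_items D hmem)).1
  rw [merge_eq_map_lookVal fieldnames 0 ps hpw hge]
  apply List.map_congr_left
  intro q _
  exact (lookVal_eq_getD D ps hperm hnd q.1 q.2).symm
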